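-- pv_equiv track=rewrite | github.com/lumia1998/activitywatch | aw-watcher-window/aw_watcher_window/windows.py | _extract_meaningful_title
-- ===== SOURCE A (Python) =====
-- TITLE_SEPARATORS = (" - ", " | ", " — ", " – ", ":")
--
-- def _extract_meaningful_title(window_title: str) -> str:
--     normalized = window_title.strip()
--     if not normalized:
--         return ""
--
--     cut_index = -1
--     for separator in TITLE_SEPARATORS:
--         index = normalized.find(separator)
--         if index <= 0:
--             continue
--         if cut_index == -1 or index < cut_index:
--             cut_index = index
--
--     segment = normalized[:cut_index].strip() if cut_index > 0 else normalized
--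
--     if len(segment) < 2 or len(segment) > 64:
--         return ""
--
--     if ".exe" in segment.lower() or "\\" in segment or "/" in segment:
--         return ""
--
--     return segment
-- ===== SOURCE B (Python) =====
-- TITLE_SEPARATORS = (" - ", " | ", " — ", " – ", ":")
--
-- def _extract_meaningful_title(window_title: str) -> str:
--     normalized = window_title.strip()
--     if not normalized:
--         return ""
--
--     # Separators the title itself starts with can never yield a positive first
--     # occurrence, so drop them once, then find the first matching position.
--     active = [s for s in TITLE_SEPARATORS if not normalized.startswith(s)]
--     cut_index = -1
--     for i in range(1, len(normalized)):
--         if any(normalized.startswith(s, i) for s in active):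
--             cut_index = i
--             break
--
--     segment = normalized[:cut_index].strip() if cut_index > 0 else normalized
--
--     if not (2 <= len(segment) <= 64) or ".exe" in segment.lower() or "\\" in segment or "/" in segment:
--         return ""
--
--     return segment
-- ===== Notes on version B (the rewrite author's own statement) =====
-- stated objective: alternative
-- what changed: A loops over separators taking the minimum positive find() index; B instead filters out separators the title starts with once, then does a single positional scan returning the first index >= 1 where any remaining separator matches.
import Mathlib
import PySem

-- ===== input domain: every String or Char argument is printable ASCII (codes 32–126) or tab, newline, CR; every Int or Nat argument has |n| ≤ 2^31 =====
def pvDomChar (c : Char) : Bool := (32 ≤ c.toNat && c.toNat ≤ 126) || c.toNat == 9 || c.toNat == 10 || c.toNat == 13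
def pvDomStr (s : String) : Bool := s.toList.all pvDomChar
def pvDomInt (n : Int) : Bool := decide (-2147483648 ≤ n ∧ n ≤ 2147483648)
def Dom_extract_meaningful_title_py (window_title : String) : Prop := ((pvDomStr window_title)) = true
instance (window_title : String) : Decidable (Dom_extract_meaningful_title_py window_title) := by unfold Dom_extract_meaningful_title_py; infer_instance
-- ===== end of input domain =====

-- B replaces A's per-separator find/minimum loop by a one-time filter of the separators the
-- title starts with followed by a single positional scan for the first matching index
-- (objective: alternative decomposition, same asymptotic cost).

-- ===== PORT A =====
def TITLE_SEPARATORS : List (List Char) :=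
  [" - ".toList, " | ".toList, " — ".toList, " – ".toList, ":".toList]

def extract_meaningful_title_py (window_title : String) : String :=
  let normalized := PySem.Chars.strip window_title.toList
  if normalized = [] then ""
  else
    -- cut_index loop: for separator in TITLE_SEPARATORS: …
    let cut_index := TITLE_SEPARATORS.foldl (fun cut_index separator =>
        let index := PySem.Chars.find normalized separator
        if index ≤ 0 then cut_index
        else if cut_index = -1 ∨ index < cut_index then index else cut_index) (-1)
    let segment := if 0 < cut_index then
        PySem.Chars.strip (PySem.List.slice normalized none (some cut_index))
      else normalized
    if segment.length < 2 ∨ 64 < segment.length then ""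
    else if PySem.Chars.isIn ".exe".toList (PySem.Chars.lower segment) ∨
            PySem.Chars.isIn ['\\'] segment ∨ PySem.Chars.isIn ['/'] segment then ""
    else String.ofList segment

-- ===== PORT B =====
def extract_meaningful_title_py_alt (window_title : String) : String :=
  let normalized := PySem.Chars.strip window_title.toList
  if normalized = [] then ""
  else
    let active := TITLE_SEPARATORS.filter (fun s => !(PySem.Chars.startswith normalized s))
    -- for i in range(1, len(normalized)): if any(normalized.startswith(s, i) …): break
    -- startswith(s, i) for 0 ≤ i ≤ len(normalized) is exactly "s is a prefix of the drop at i"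
    let cut_index := match (PySem.List.pyRange 1 (normalized.length : Int) 1).find?
        (fun i => active.any (fun s => s.isPrefixOf (normalized.drop i.toNat))) with
      | some i => i
      | none => -1
    let segment := if 0 < cut_index then
        PySem.Chars.strip (PySem.List.slice normalized none (some cut_index))
      else normalized
    if ¬(2 ≤ segment.length ∧ segment.length ≤ 64) ∨
       PySem.Chars.isIn ".exe".toList (PySem.Chars.lower segment) ∨
       PySem.Chars.isIn ['\\'] segment ∨ PySem.Chars.isIn ['/'] segment then ""
    else String.ofList segment

-- ===== PRECONDITION & SPEC =====
def Spec_extract_meaningful_title_py (window_title : String) (out : String) : Prop := out = extract_meaningful_title_py_alt window_title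
instance (window_title : String) (out : String) : Decidable (Spec_extract_meaningful_title_py window_title out) := by unfold Spec_extract_meaningful_title_py; infer_instance

-- ===== CLAIM (what is proved, stated in full; the proofs are below) =====
def Claim_equal_extract_meaningful_title_py : Prop := ∀ (window_title : String), Dom_extract_meaningful_title_py window_title → Spec_extract_meaningful_title_py window_title (extract_meaningful_title_py window_title)

-- ===== LEMMAS AND PROOFS =====


def pvStep (l : List Char) (cut_index : Int) (separator : List Char) : Int :=
  let index := PySem.Chars.find l separator
  if index ≤ 0 then cut_index
  else if cut_index = -1 ∨ index < cut_index then index else cut_index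

theorem foldA_inv (l : List Char) (seps : List (List Char)) :
    ∀ acc : Int, (acc = -1 ∨ 0 < acc) →
    ((seps.foldl (pvStep l) acc = acc ∨
        ∃ s ∈ seps, seps.foldl (pvStep l) acc = PySem.Chars.find l s ∧ 0 < PySem.Chars.find l s) ∧
      (∀ s ∈ seps, 0 < PySem.Chars.find l s → seps.foldl (pvStep l) acc ≤ PySem.Chars.find l s) ∧
      (acc ≠ -1 → seps.foldl (pvStep l) acc ≤ acc) ∧
      (seps.foldl (pvStep l) acc = -1 → acc = -1 ∧ ∀ s ∈ seps, PySem.Chars.find l s ≤ 0)) := by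
  induction seps with
  | nil => intro acc hacc; simp
  | cons hd tl ih =>
    intro acc hacc
    simp only [List.foldl_cons, List.mem_cons]
    by_cases hj : PySem.Chars.find l hd ≤ 0
    · rw [show pvStep l acc hd = acc by simp [pvStep, hj]]
      obtain ⟨h1, h2, h3, h4⟩ := ih acc hacc
      refine ⟨?_, ?_, h3, ?_⟩
      · rcases h1 with h | ⟨s, hs, he, hp⟩
        · exact Or.inl h
        · exact Or.inr ⟨s, Or.inr hs, he, hp⟩
      · intro s hs hpos
        rcases hs with rfl | hs
        · omega
        · exact h2 s hs hpos
      · intro hr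
        obtain ⟨ha, hall⟩ := h4 hr
        refine ⟨ha, fun s hs => ?_⟩
        rcases hs with rfl | hs
        exacts [hj, hall s hs]
    · set acc' := pvStep l acc hd with hacc'
      have hsplit : acc' = PySem.Chars.find l hd ∨ acc' = acc := by
        rw [hacc']; simp only [pvStep, if_neg hj]
        split_ifs; exacts [Or.inl rfl, Or.inr rfl]
      have hle1 : acc' ≤ PySem.Chars.find l hd := by
        rw [hacc']; simp only [pvStep, if_neg hj]
        split_ifs with h
        · omega
        · rcases not_or.mp h with ⟨h1, h2⟩; omega
      have hle2 : acc ≠ -1 → acc' ≤ acc := by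
        rw [hacc']; simp only [pvStep, if_neg hj]
        split_ifs with h
        · rcases h with h | h
          · intro hne; exact absurd h hne
          · intro _; omega
        · intro _; omega
      have hpos' : 0 < acc' := by
        rcases hsplit with h | h
        · omega
        · rcases hacc with ha | ha
          · rw [hacc'] at h ⊢; simp only [pvStep, if_neg hj] at h ⊢
            rw [if_pos (Or.inl ha)]; omega
          · omega
      obtain ⟨h1, h2, h3, h4⟩ := ih acc' (Or.inr hpos')
      refine ⟨?_, ?_, ?_, ?_⟩
      · rcases h1 with h | ⟨s, hs, he, hp⟩
        · rcases hsplit with he' | he'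
          · exact Or.inr ⟨hd, Or.inl rfl, h.trans he', by omega⟩
          · rcases hacc with ha | ha
            · have : acc' = PySem.Chars.find l hd := by omega
              exact Or.inr ⟨hd, Or.inl rfl, h.trans this, by omega⟩
            · exact Or.inl (h.trans he')
        · exact Or.inr ⟨s, Or.inr hs, he, hp⟩
      · intro s hs hpos
        rcases hs with rfl | hs
        · exact (h3 (by omega)).trans hle1
        · exact h2 s hs hpos
      · intro hne
        rcases hacc with rfl | hpos
        · omega
        · exact (h3 (by omega)).trans (hle2 (by omega))
      · intro hr
        have := h3 (by omega)
        omega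

theorem find?_pyRange_none (a b : Int) (p : Int → Bool) :
    (PySem.List.pyRange a b 1).find? p = none ↔ ∀ i, a ≤ i → i < b → p i = false := by
  rw [List.find?_eq_none]
  constructor
  · intro h i h1 h2
    simpa using h i (by rw [PySem.List.mem_pyRange_one]; exact ⟨h1, h2⟩)
  · intro h x hx
    rw [PySem.List.mem_pyRange_one] at hx
    simp [h x hx.1 hx.2]

theorem find?_pyRange_some (a b : Int) (p : Int → Bool) (x : Int) :
    (PySem.List.pyRange a b 1).find? p = some x ↔
      (a ≤ x ∧ x < b ∧ p x = true ∧ ∀ i, a ≤ i → i < x → p i = false) := by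
  obtain ⟨n, hn⟩ : ∃ n : Nat, (b - a).toNat = n := ⟨_, rfl⟩
  induction n generalizing a with
  | zero =>
    rw [PySem.List.pyRange_one_eq_nil (by omega)]
    simp only [List.find?_nil]
    constructor
    · intro h; cases h
    · rintro ⟨h1, h2, _⟩; omega
  | succ n ih =>
    rw [PySem.List.pyRange_one_cons (by omega)]
    by_cases hpa : p a
    · simp only [List.find?_cons, hpa]
      constructor
      · rintro ⟨rfl⟩
        exact ⟨le_refl _, by omega, hpa, fun i h1 h2 => by omega⟩
      · rintro ⟨h1, h2, h3, h4⟩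
        by_cases hx : x = a
        · subst hx; rfl
        · exact absurd (h4 a (le_refl _) (by omega)) (by simp [hpa])
    · simp only [List.find?_cons, show p a = false from Bool.not_eq_true _ ▸ eq_false_of_ne_true hpa]
      rw [ih (a + 1) (by omega)]
      constructor
      · rintro ⟨h1, h2, h3, h4⟩
        refine ⟨by omega, h2, h3, fun i hi1 hi2 => ?_⟩
        by_cases hia : i = a
        · subst hia; simpa using hpa
        · exact h4 i (by omega) hi2
      · rintro ⟨h1, h2, h3, h4⟩
        have hxa : x ≠ a := by rintro rfl; exact hpa h3
        exact ⟨by omega, h2, h3, fun i hi1 hi2 => h4 i (by omega) hi2⟩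

theorem find_pos_le (l s : List Char) (j : Nat) (hnpre : ¬ s <+: l) (hpre : s <+: l.drop j) :
    0 < PySem.Chars.find l s ∧ PySem.Chars.find l s ≤ (j : Int) := by
  have hinf : s <:+: l := hpre.isInfix.trans (List.drop_suffix j l).isInfix
  have h0 : 0 ≤ PySem.Chars.find l s := (PySem.Chars.find_nonneg_iff l s).mpr hinf
  obtain ⟨hp, hm⟩ := PySem.Chars.find_spec h0
  have hne0 : PySem.Chars.find l s ≠ 0 := by
    intro h; apply hnpre; rw [h] at hp; simpa using hp
  have hle : (PySem.Chars.find l s).toNat ≤ j := by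
    by_contra hc
    exact hm j (by omega) hpre
  omega

theorem cut_eq (l : List Char) (seps : List (List Char)) (hne : ∀ s ∈ seps, s ≠ []) :
    seps.foldl (pvStep l) (-1)
    = (match (PySem.List.pyRange 1 (l.length : Int) 1).find?
        (fun i => (seps.filter (fun s => !(PySem.Chars.startswith l s))).any
          (fun s => s.isPrefixOf (l.drop i.toNat))) with
      | some i => i
      | none => -1) := by
  set p : Int → Bool := fun i => (seps.filter (fun s => !(PySem.Chars.startswith l s))).any
      (fun s => s.isPrefixOf (l.drop i.toNat)) with hpdef
  have hp : ∀ i : Int, p i = true ↔ ∃ s ∈ seps, ¬ (s <+: l) ∧ s <+: l.drop i.toNat := by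
    intro i
    simp [hpdef, List.any_eq_true, List.isPrefixOf_iff_prefix,
      PySem.Chars.startswith_iff, Bool.eq_false_iff, ne_eq]
  obtain ⟨h1, h2, _, h4⟩ := foldA_inv l seps (-1) (Or.inl rfl)
  rcases h1 with hr | ⟨s0, hs0, hre, hrpos⟩
  · rw [hr]
    have hall := (h4 hr).2
    have hnone : (PySem.List.pyRange 1 (l.length : Int) 1).find? p = none := by
      rw [find?_pyRange_none]
      intro i hi1 hi2
      by_contra hcon
      obtain ⟨s, hs, hnpre, hpre⟩ := (hp i).mp (by revert hcon; cases p i <;> simp)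
      have := find_pos_le l s i.toNat hnpre hpre
      have := hall s hs
      omega
    rw [hnone]
  · rw [hre]
    have h0 : (0:Int) ≤ PySem.Chars.find l s0 := by omega
    obtain ⟨hpref, hmin⟩ := PySem.Chars.find_spec h0
    have hnpre : ¬ s0 <+: l := by
      intro hcon
      exact hmin 0 (by omega) (by simpa using hcon)
    have hlt : (PySem.Chars.find l s0).toNat < l.length := by
      by_contra hc
      have : l.drop (PySem.Chars.find l s0).toNat = [] := List.drop_eq_nil_of_le (by omega)
      rw [this] at hpref
      exact hne s0 hs0 (List.prefix_nil.mp hpref)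
    have hsome : (PySem.List.pyRange 1 (l.length : Int) 1).find? p = some (PySem.Chars.find l s0) := by
      rw [find?_pyRange_some]
      refine ⟨by omega, by omega, ?_, ?_⟩
      · exact (hp _).mpr ⟨s0, hs0, hnpre, hpref⟩
      · intro i hi1 hi2
        by_contra hcon
        obtain ⟨s, hs, hnp, hpi⟩ := (hp i).mp (by revert hcon; cases p i <;> simp)
        obtain ⟨hf1, hf2⟩ := find_pos_le l s i.toNat hnp hpi
        have := h2 s hs hf1
        omega
    rw [hsome]

-- ===== VERDICT (by name: the statement is the Claim_ definition above) =====
theorem extract_meaningful_title_py_spec : Claim_equal_extract_meaningful_title_py := by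
  intro w _
  unfold Spec_extract_meaningful_title_py
  simp only [extract_meaningful_title_py, extract_meaningful_title_py_alt]
  set l := PySem.Chars.strip w.toList with hl
  by_cases h : l = []
  · rw [if_pos h, if_pos h]
  · rw [if_neg h, if_neg h]
    have hcut : List.foldl
        (fun cut_index separator =>
          if PySem.Chars.find l separator ≤ 0 then cut_index
          else
            if cut_index = -1 ∨ PySem.Chars.find l separator < cut_index then PySem.Chars.find l separator
            else cut_index)
        (-1) TITLE_SEPARATORS =
        (match
          List.find?
            (fun i =>
              (List.filter (fun s => !PySem.Chars.startswith l s) TITLE_SEPARATORS).any fun s =>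
                s.isPrefixOf (List.drop i.toNat l))
            (PySem.List.pyRange 1 (l.length : Int) 1) with
        | some i => i
        | none => -1) := cut_eq l TITLE_SEPARATORS (by decide)
    rw [hcut]
    set c : Int := (match
          List.find?
            (fun i =>
              (List.filter (fun s => !PySem.Chars.startswith l s) TITLE_SEPARATORS).any fun s =>
                s.isPrefixOf (List.drop i.toNat l))
            (PySem.List.pyRange 1 (l.length : Int) 1) with
        | some i => i
        | none => -1) with hc
    set seg := (if 0 < c then PySem.Chars.strip (PySem.List.slice l none (some c)) else l) with hseg
    by_cases hlen : seg.length < 2 ∨ 64 < seg.length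
    · rw [if_pos hlen, if_pos (Or.inl (by omega))]
    · rw [if_neg hlen]
      by_cases hbad : (PySem.Chars.isIn ".exe".toList (PySem.Chars.lower seg) = true) ∨
          (PySem.Chars.isIn ['\\'] seg = true) ∨ (PySem.Chars.isIn ['/'] seg = true)
      · rw [if_pos hbad, if_pos (Or.inr hbad)]
      · rw [if_neg hbad, if_neg (fun hcon => hcon.elim (fun hn => hn ⟨by omega, by omega⟩) hbad)]
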